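-- pv_equiv track=rewrite | github.com/Leihyn/Leihyn | sentinel/src/agents/protocol_hunters/aave_hunter.py | _is_aave_integration
-- ===== SOURCE A (Python) =====
-- def _is_aave_integration(source: str) -> bool:
--     """Check if contract integrates with Aave."""
--     aave_indicators = [
--         "IPool",
--         "IPoolAddressesProvider",
--         "aToken",
--         "debtToken",
--         "DataTypes.ReserveData",
--         "@aave",
--         "flashLoanSimple",
--         "getUserAccountData",
--     ]
--     return any(ind in source for ind in aave_indicators)
-- ===== SOURCE B (Python) =====
-- import re
--
-- _AAVE_PATTERN = re.compile(
--     "|".join(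
--         re.escape(ind)
--         for ind in (
--             "IPool",
--             "IPoolAddressesProvider",
--             "aToken",
--             "debtToken",
--             "DataTypes.ReserveData",
--             "@aave",
--             "flashLoanSimple",
--             "getUserAccountData",
--         )
--     )
-- )
--
--
-- def _is_aave_integration(source: str) -> bool:
--     """Check if contract integrates with Aave."""
--     return bool(_AAVE_PATTERN.search(source))
-- ===== Notes on version B (the rewrite author's own statement) =====
-- stated objective: idiomatic
-- what changed: Replaces eight separate Python-level substring-membership scans with one precompiled regex (each literal re.escape-d, joined into an alternation) and a single pattern.search over the source.
import Mathlib
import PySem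

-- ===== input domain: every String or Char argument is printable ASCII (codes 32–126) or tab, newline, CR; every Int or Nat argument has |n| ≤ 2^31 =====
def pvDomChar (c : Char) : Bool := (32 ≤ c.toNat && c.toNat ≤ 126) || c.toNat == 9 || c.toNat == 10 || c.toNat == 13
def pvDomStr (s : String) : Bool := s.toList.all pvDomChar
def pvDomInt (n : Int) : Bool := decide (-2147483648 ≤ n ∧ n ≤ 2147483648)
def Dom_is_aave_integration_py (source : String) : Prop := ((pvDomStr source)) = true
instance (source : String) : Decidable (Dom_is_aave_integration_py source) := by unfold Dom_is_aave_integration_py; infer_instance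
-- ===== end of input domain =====

-- B replaces eight separate Python-level substring scans with one compiled regex of
-- escaped literals joined by '|' and a single pattern.search over the source (idiomatic).

-- ===== PORT A =====
-- the literal indicator list of A
def pvAaveIndicators : List String :=
  ["IPool", "IPoolAddressesProvider", "aToken", "debtToken",
   "DataTypes.ReserveData", "@aave", "flashLoanSimple", "getUserAccountData"]

-- any(ind in source for ind in aave_indicators)
def is_aave_integration_py (source : String) : Bool :=
  pvAaveIndicators.any (fun ind => PySem.Str.isIn ind source)

-- ===== PORT B =====
-- the compiled alternation pattern: each alternative is an escaped LITERAL, so the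
-- compiled regex is exactly this list of literal character sequences
def pvAavePattern : List (List Char) :=
  ["IPool".toList, "IPoolAddressesProvider".toList, "aToken".toList, "debtToken".toList,
   "DataTypes.ReserveData".toList, "@aave".toList, "flashLoanSimple".toList,
   "getUserAccountData".toList]

-- pattern.search: one left-to-right scan; at each position try every alternative as a
-- literal prefix match (exact semantics of a literal-alternation regex search)
def pvRegexSearch (pat : List (List Char)) : List Char → Bool
  | [] => pat.any (fun p => p.isPrefixOf ([] : List Char))
  | c :: rest =>
    pat.any (fun p => p.isPrefixOf (c :: rest)) || pvRegexSearch pat rest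

-- bool(_AAVE_PATTERN.search(source))
def is_aave_integration_py_alt (source : String) : Bool :=
  pvRegexSearch pvAavePattern source.toList

-- ===== PRECONDITION & SPEC =====
def Spec_is_aave_integration_py (source : String) (out : Bool) : Prop := out = is_aave_integration_py_alt source
instance (source : String) (out : Bool) : Decidable (Spec_is_aave_integration_py source out) := by unfold Spec_is_aave_integration_py; infer_instance

-- ===== CLAIM (what is proved, stated in full; the proofs are below) =====
def Claim_equal_is_aave_integration_py : Prop := ∀ (source : String), Dom_is_aave_integration_py source → Spec_is_aave_integration_py source (is_aave_integration_py source)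

-- ===== LEMMAS AND PROOFS =====

-- the scan finds some alternative iff some alternative is an infix (= Python's 'in')
theorem pvRegexSearch_eq_any_isIn (pat : List (List Char)) (s : List Char) :
    pvRegexSearch pat s = pat.any (fun p => PySem.Chars.isIn p s) := by
  induction s with
  | nil =>
    rw [Bool.eq_iff_iff]
    simp [pvRegexSearch, List.any_eq_true, PySem.Chars.isIn_iff_infix]
  | cons c rest ih =>
    rw [pvRegexSearch, ih, Bool.eq_iff_iff]
    simp only [Bool.or_eq_true, List.any_eq_true, PySem.Chars.isIn_iff_infix,
      List.infix_cons_iff, List.isPrefixOf_iff_prefix]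
    constructor
    · rintro (⟨p, hp, h⟩ | ⟨p, hp, h⟩)
      · exact ⟨p, hp, Or.inl h⟩
      · exact ⟨p, hp, Or.inr h⟩
    · rintro ⟨p, hp, h | h⟩
      · exact Or.inl ⟨p, hp, h⟩
      · exact Or.inr ⟨p, hp, h⟩

-- ===== VERDICT (by name: the statement is the Claim_ definition above) =====
theorem is_aave_integration_py_spec : Claim_equal_is_aave_integration_py := by
  intro source _
  unfold Spec_is_aave_integration_py is_aave_integration_py is_aave_integration_py_alt
  rw [pvRegexSearch_eq_any_isIn, Bool.eq_iff_iff]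
  simp [pvAaveIndicators, pvAavePattern, PySem.Chars.isIn_iff_infix]
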